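-- pv_equiv track=rewrite | github.com/rakesh-050791/DS-Algo | Basics/14-June-2022.py | change_char
-- ===== SOURCE A (Python) =====
-- def change_char(s):
--     res = ''
--
--     for i in range(len(s)):
--         if i == 0:
--             res += s[0]
--         elif s[i] == s[0]:
--             res += '$'
--         else:
--             res += s[i]
--     return res
-- ===== SOURCE B (Python) =====
-- def change_char(s):
--     if not s:
--         return ''
--     return s[0] + s[1:].replace(s[0], '$')
-- ===== Notes on version B (the rewrite author's own statement) =====
-- stated objective: idiomatic
-- what changed: Replaces the explicit indexed loop with i==0/elif branches and repeated string concatenation by a head/tail split plus a single bulk str.replace over the tail.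
import Mathlib
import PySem

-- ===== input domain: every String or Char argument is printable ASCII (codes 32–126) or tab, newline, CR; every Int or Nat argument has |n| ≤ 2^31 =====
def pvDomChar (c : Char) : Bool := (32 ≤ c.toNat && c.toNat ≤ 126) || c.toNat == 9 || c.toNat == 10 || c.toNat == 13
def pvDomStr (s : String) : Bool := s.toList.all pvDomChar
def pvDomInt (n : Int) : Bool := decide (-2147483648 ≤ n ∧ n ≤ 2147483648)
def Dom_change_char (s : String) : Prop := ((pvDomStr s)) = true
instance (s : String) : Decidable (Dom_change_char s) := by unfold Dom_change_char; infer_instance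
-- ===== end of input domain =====

-- B replaces A's indexed per-character loop by a head/tail split with one bulk replace over the tail (idiomatic).

-- ===== PORT A =====
def change_char (s : String) : String :=
  String.ofList
    ((PySem.List.pyRange 0 (PySem.Str.len s) 1).foldl
      (fun res i =>
        if i = 0 then res ++ [PySem.List.pyGetD s.toList 0 ' ']
        else if PySem.List.pyGetD s.toList i ' ' = PySem.List.pyGetD s.toList 0 ' ' then res ++ ['$']
        else res ++ [PySem.List.pyGetD s.toList i ' '])
      [])

-- ===== PORT B =====
def change_char_alt (s : String) : String :=
  match s.toList with
  | [] => ""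
  | c :: t => String.ofList ([c] ++ PySem.Chars.replace t [c] ['$'])

-- ===== PRECONDITION & SPEC =====
def Spec_change_char (s : String) (out : String) : Prop := out = change_char_alt s
instance (s : String) (out : String) : Decidable (Spec_change_char s out) := by unfold Spec_change_char; infer_instance

-- ===== CLAIM (what is proved, stated in full; the proofs are below) =====
def Claim_equal_change_char : Prop := ∀ (s : String), Dom_change_char s → Spec_change_char s (change_char s)

-- ===== LEMMAS AND PROOFS =====

-- replace.go with a single-character pattern is a pointwise map
lemma replace_go_single (c d : Char) :
    ∀ (l : List Char) (fuel : Nat) (acc : List Char), l.length ≤ fuel →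
      PySem.Chars.replace.go [c] [d] fuel l acc
        = acc.reverse ++ l.map (fun x => if x = c then d else x) := by
  intro l
  induction l with
  | nil =>
      intro fuel acc _
      cases fuel <;> simp [PySem.Chars.replace.go]
  | cons x t ih =>
      intro fuel acc h
      cases fuel with
      | zero => simp at h
      | succ f =>
          simp only [PySem.Chars.replace.go]
          by_cases hx : x = c
          · subst hx
            simp only [List.isPrefixOf, BEq.rfl, Bool.true_and, if_pos, List.length_cons, List.length_nil, List.drop_succ_cons, List.drop_zero]
            rw [ih f ([d].reverse ++ acc) (by simpa using h)]
            simp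
          · have : ([c].isPrefixOf (x :: t)) = false := by
              simp [List.isPrefixOf]
              intro hc; exact hx hc.symm
            rw [this]
            simp only [Bool.false_eq_true, if_false]
            rw [ih f (x :: acc) (by simpa using Nat.le_of_succ_le_succ h)]
            simp [hx]

lemma replace_single (c d : Char) (t : List Char) :
    PySem.Chars.replace t [c] [d] = t.map (fun x => if x = c then d else x) := by
  unfold PySem.Chars.replace
  simp only [List.isEmpty_cons, Bool.false_eq_true, if_false]
  simpa using replace_go_single c d t t.length [] le_rfl

-- ===== VERDICT (by name: the statement is the Claim_ definition above) =====
theorem change_char_spec : Claim_equal_change_char := by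
  intro s _
  unfold Spec_change_char change_char change_char_alt
  cases hs : s.toList with
  | nil =>
      simp [PySem.Str.len_eq, hs, PySem.List.pyRange_one_eq_nil]
  | cons c t =>
      have hlen : PySem.Str.len s = ((c :: t).length : Int) := by
        simp [PySem.Str.len_eq, hs]
      rw [hlen]
      have hsplit : PySem.List.pyRange 0 ((c :: t).length : Int) 1
          = 0 :: PySem.List.pyRange 1 ((c :: t).length : Int) 1 := by
        exact PySem.List.pyRange_one_cons (by simp)
      rw [hsplit]
      simp only [List.foldl_cons, PySem.List.pyGetD_zero_cons, List.nil_append, if_true]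
      have hcongr : (PySem.List.pyRange 1 ((c :: t).length : Int) 1).foldl
            (fun res i =>
              if i = 0 then res ++ [c]
              else if PySem.List.pyGetD (c :: t) i ' ' = c then res ++ ['$']
              else res ++ [PySem.List.pyGetD (c :: t) i ' ']) [c]
          = (PySem.List.pyRange 1 ((c :: t).length : Int) 1).foldl
            (fun res i =>
              if PySem.List.pyGetD (c :: t) i ' ' = c then res ++ ['$']
              else res ++ [PySem.List.pyGetD (c :: t) i ' ']) [c] := by
        apply PySem.List.foldl_congr_mem
        intro acc i hi
        have h1 : (1 : Int) ≤ i := (PySem.List.mem_pyRange_one.mp hi).1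
        have hne : i ≠ 0 := by omega
        simp [hne]
      rw [hcongr]
      have hfold : (PySem.List.pyRange 1 ((c :: t).length : Int) 1).foldl
            (fun res i =>
              if PySem.List.pyGetD (c :: t) i ' ' = c then res ++ ['$']
              else res ++ [PySem.List.pyGetD (c :: t) i ' ']) [c]
          = ((c :: t).drop 1).foldl
            (fun res x => if x = c then res ++ ['$'] else res ++ [x]) [c] := by
        exact PySem.List.foldl_pyRange_pyGetD (xs := c :: t) (a := 1) (d := ' ')
          (f := fun res x => if x = c then res ++ ['$'] else res ++ [x]) (init := [c]) (by norm_num)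
      rw [hfold]
      have hmap : t.foldl (fun res x => if x = c then res ++ ['$'] else res ++ [x]) [c]
          = [c] ++ t.map (fun x => if x = c then '$' else x) := by
        have hm := PySem.List.foldl_append_singleton_eq_map
          (l := t) (f := fun x => if x = c then '$' else x) (acc := [c])
        rw [← hm]
        apply PySem.List.foldl_congr_mem
        intro acc x _
        by_cases hx : x = c <;> simp [hx]
      simp only [List.drop_succ_cons, List.drop_zero, hmap, replace_single]
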